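-- pv_equiv track=rewrite | github.com/Chiki1601/Hackerearth-Solutions | Basic Programming/Basics of Implementation/Teaching how to draw.py | countRectangle
-- ===== SOURCE A (Python) =====
-- import math
--
-- def countRectangle(n):
--     cnt = 0
--     for l in range(1, int(math.sqrt(n)) + 1):
--         h = l
--         while(h * l <= n):
--             cnt += 1
--             h += 1
--     return cnt
-- ===== SOURCE B (Python) =====
-- import math
--
-- def countRectangle(n):
--     # Same count, but each inner while-loop collapses to the closed form
--     # n//l - l + 1 (number of h with l <= h and h*l <= n): O(sqrt n) total.
--     cnt = 0
--     for l in range(1, math.isqrt(n) + 1):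
--         cnt += n // l - l + 1
--     return cnt
-- ===== Notes on version B (the rewrite author's own statement) =====
-- stated objective: faster
-- what changed: The inner while-loop counting h from l while h*l<=n is replaced by the closed form n//l - l + 1, turning the O(n log n) double loop into a single O(sqrt n) pass.
import Mathlib
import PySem

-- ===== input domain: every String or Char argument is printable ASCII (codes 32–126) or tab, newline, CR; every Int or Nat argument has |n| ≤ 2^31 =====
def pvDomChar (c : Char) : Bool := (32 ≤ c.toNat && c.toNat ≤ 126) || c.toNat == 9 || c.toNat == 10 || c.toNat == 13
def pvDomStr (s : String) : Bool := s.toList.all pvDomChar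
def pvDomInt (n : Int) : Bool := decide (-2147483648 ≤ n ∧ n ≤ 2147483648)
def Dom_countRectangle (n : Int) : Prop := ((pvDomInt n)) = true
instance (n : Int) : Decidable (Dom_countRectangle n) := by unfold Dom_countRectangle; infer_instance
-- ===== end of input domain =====

-- B replaces A's inner counting while-loop by the closed form n//l - l + 1 (asymptotically faster).

-- ===== PORT A =====
-- inner while-loop 'while h*l <= n: cnt += 1; h += 1'; the extra '1 ≤ l' conjunct is a
-- totality guard only (every caller passes l ≥ 1, where it is always true).
def countRectangleInner (n l h cnt : Int) : Int :=
  if hg : h * l ≤ n ∧ 1 ≤ l then countRectangleInner n l (h + 1) (cnt + 1) else cnt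
termination_by (n - h * l + 1).toNat
decreasing_by
  obtain ⟨hga, hgb⟩ := hg
  have h1 : (h + 1) * l = h * l + l := by ring
  omega

-- int(math.sqrt(n)) ported as Nat.sqrt n.toNat: exact for 0 ≤ n ≤ 2^31 (double sqrt
-- never rounds across an integer there), i.e. on all of Dom ∩ Pre_.
def countRectangle (n : Int) : Int :=
  (PySem.List.pyRange 1 ((Nat.sqrt n.toNat : Int) + 1) 1).foldl
    (fun cnt l => countRectangleInner n l l cnt) 0

-- ===== PORT B =====
def countRectangle_alt (n : Int) : Int :=
  (PySem.List.pyRange 1 ((Nat.sqrt n.toNat : Int) + 1) 1).foldl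
    (fun cnt l => cnt + (PySem.Int.floordiv n l - l + 1)) 0

-- ===== PRECONDITION & SPEC =====
-- math.sqrt (and B's math.isqrt) raise ValueError on negative input, so Pre_ excludes n < 0.
def Pre_countRectangle (n : Int) : Prop := 0 ≤ n
instance (n : Int) : Decidable (Pre_countRectangle n) := by unfold Pre_countRectangle; infer_instance
def pvWitness_countRectangle : Int := 10

def Spec_countRectangle (n : Int) (out : Int) : Prop := out = countRectangle_alt n
instance (n : Int) (out : Int) : Decidable (Spec_countRectangle n out) := by unfold Spec_countRectangle; infer_instance

-- ===== CLAIM (what is proved, stated in full; the proofs are below) =====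
def Claim_equal_countRectangle : Prop := ∀ (n : Int), Dom_countRectangle n → Pre_countRectangle n → Spec_countRectangle n (countRectangle n)

-- ===== LEMMAS AND PROOFS =====

-- A's inner loop started at h computes cnt + #{h' ≥ h | h'·l ≤ n} = cnt + max (n//l - h + 1) 0.
theorem countRectangleInner_eq (n l : Int) (hl : 1 ≤ l) :
    ∀ k h cnt, (n - h * l + 1).toNat = k →
      countRectangleInner n l h cnt = cnt + max (PySem.Int.floordiv n l - h + 1) 0 := by
  intro k
  induction k using Nat.strong_induction_on with
  | _ k ih =>
    intro h cnt hk
    rw [countRectangleInner]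
    split
    · next hg =>
      have hfd : h ≤ PySem.Int.floordiv n l :=
        (PySem.Int.le_floordiv_iff_mul_le (by omega)).2 hg.1
      have h1 : (h + 1) * l = h * l + l := by ring
      rw [ih ((n - (h + 1) * l + 1).toNat) (by omega) (h + 1) (cnt + 1) rfl]
      omega
    · next hg =>
      have hlt : n < h * l := by
        rcases not_and_or.1 hg with h1 | h1
        · omega
        · omega
      have hfd : PySem.Int.floordiv n l < h :=
        (PySem.Int.floordiv_lt_iff_lt_mul (by omega)).2 hlt
      omega

-- ===== VERDICT (by name: the statement is the Claim_ definition above) =====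
theorem countRectangle_spec : Claim_equal_countRectangle := by
  intro n _ hpre
  unfold Spec_countRectangle countRectangle countRectangle_alt
  apply PySem.List.foldl_congr_mem
  intro cnt l hmem
  rw [PySem.List.mem_pyRange_one] at hmem
  obtain ⟨h1, h2⟩ := hmem
  have hsq : (Nat.sqrt n.toNat : Int) * (Nat.sqrt n.toNat : Int) ≤ n := by
    have h := Nat.sqrt_le' n.toNat
    have h2 : (Nat.sqrt n.toNat : Int) ^ 2 ≤ (n.toNat : Int) := by exact_mod_cast h
    have h3 : (n.toNat : Int) = n := Int.toNat_of_nonneg hpre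
    nlinarith [h2, h3]
  have hll : l * l ≤ n := by nlinarith
  have hfd : l ≤ PySem.Int.floordiv n l :=
    (PySem.Int.le_floordiv_iff_mul_le (by omega)).2 hll
  rw [countRectangleInner_eq n l h1 _ l cnt rfl]
  omega
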